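-- pv_equiv track=rewrite | github.com/oyang0/battlesnake | src/logic.py | _avoid_hitting_myself
-- ===== SOURCE A (Python) =====
-- from typing import List, Dict
--
-- def _avoid_hitting_myself(my_body: dict, possible_moves: List[str]) -> List[str]:
--     """
--     my_body: List of dictionaries of x/y coordinates for every segment of a Battlesnake.
--             e.g. [{"x": 0, "y": 0}, {"x": 1, "y": 0}, {"x": 2, "y": 0}]
--     possible_moves: List of strings. Moves to pick from.
--             e.g. ["up", "down", "left", "right"]
--
--     return: The list of remaining possible_moves, with 'body' directions removed
--     """
--     my_head = my_body[0]  # The first body coordinate is always the head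
--     my_body_ = {(body["x"], body["y"]) for body in my_body}
--     possible_moves_ = {possible_move for possible_move in possible_moves}
--
--     if (
--         my_head["x"] - 1,
--         my_head["y"],
--     ) in my_body_ and "left" in possible_moves_:  # my body is to the left of my head
--         possible_moves.remove("left")
--     if (
--         my_head["x"] + 1,
--         my_head["y"],
--     ) in my_body_ and "right" in possible_moves_:  # my body is to the right of my head
--         possible_moves.remove("right")
--     if (
--         my_head["x"],
--         my_head["y"] - 1,
--     ) in my_body_ and "down" in possible_moves_:  # my body is under my head
--         possible_moves.remove("down")
--     if (
--         my_head["x"],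
--         my_head["y"] + 1,
--     ) in my_body_ and "up" in possible_moves_:  # my body is over my head
--         possible_moves.remove("up")
--
--     return possible_moves
-- ===== SOURCE B (Python) =====
-- def _avoid_hitting_myself(my_body, possible_moves):
--     head = my_body[0]
--     hx, hy = head["x"], head["y"]
--     dirmap = {(-1, 0): "left", (1, 0): "right", (0, -1): "down", (0, 1): "up"}
--     blocked = set()
--     for seg in my_body:
--         d = dirmap.get((seg["x"] - hx, seg["y"] - hy))
--         if d is not None:
--             blocked.add(d)
--     for d in ("left", "right", "down", "up"):
--         if d in blocked and d in possible_moves: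
--             possible_moves.remove(d)
--     return possible_moves
-- ===== Notes on version B (the rewrite author's own statement) =====
-- stated objective: alternative
-- what changed: B classifies each body segment by its offset from the head into a blocked-direction set in one pass, then removes each blocked direction once, instead of building a coordinate set and doing four fixed neighbour lookups.
import Mathlib
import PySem

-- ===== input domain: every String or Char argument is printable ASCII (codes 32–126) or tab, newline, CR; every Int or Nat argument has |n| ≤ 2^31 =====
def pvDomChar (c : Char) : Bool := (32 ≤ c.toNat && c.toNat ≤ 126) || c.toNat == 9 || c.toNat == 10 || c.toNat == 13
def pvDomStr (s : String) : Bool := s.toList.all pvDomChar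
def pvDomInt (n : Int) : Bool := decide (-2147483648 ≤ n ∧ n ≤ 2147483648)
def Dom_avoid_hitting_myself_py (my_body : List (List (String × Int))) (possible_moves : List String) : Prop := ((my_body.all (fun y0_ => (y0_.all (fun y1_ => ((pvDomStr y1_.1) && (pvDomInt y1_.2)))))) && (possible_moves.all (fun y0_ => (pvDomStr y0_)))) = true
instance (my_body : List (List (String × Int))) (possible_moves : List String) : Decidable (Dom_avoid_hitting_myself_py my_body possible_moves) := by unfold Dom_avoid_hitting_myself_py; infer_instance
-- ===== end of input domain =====

-- B classifies body segments by their offset from the head into a blocked-direction set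
-- (one pass), then removes each blocked direction once — instead of A's coordinate set
-- plus four fixed neighbour lookups (objective: alternative decomposition, same cost).
-- Both A and B mutate possible_moves in place the same way; equivalence is about the
-- returned list (which is that same list).

-- ===== PORT A =====
-- body["x"]: first-match association-list lookup; total via getD 0, exact under Pre_
-- (Pre_ guarantees the key is present). Shared by both ports (both Pythons do body["x"]).
def pvGetK (d : List (String × Int)) (k : String) : Int :=
  ((d.find? (fun p => p.1 == k)).map (·.2)).getD 0

def avoid_hitting_myself_py (my_body : List (List (String × Int))) (possible_moves : List String) : List String :=
  let my_head := my_body.headD []        -- my_body[0]; Pre_ guarantees my_body ≠ []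
  let hx := pvGetK my_head "x"
  let hy := pvGetK my_head "y"
  let my_body_ : PySem.Set (Int × Int) :=
    PySem.Set.ofList (my_body.map (fun b => (pvGetK b "x", pvGetK b "y")))
  let possible_moves_ : PySem.Set String := PySem.Set.ofList possible_moves
  let pm1 := if (hx - 1, hy) ∈ my_body_ ∧ "left" ∈ possible_moves_ then
    (PySem.List.remove? possible_moves "left").getD possible_moves else possible_moves
  let pm2 := if (hx + 1, hy) ∈ my_body_ ∧ "right" ∈ possible_moves_ then
    (PySem.List.remove? pm1 "right").getD pm1 else pm1
  let pm3 := if (hx, hy - 1) ∈ my_body_ ∧ "down" ∈ possible_moves_ then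
    (PySem.List.remove? pm2 "down").getD pm2 else pm2
  if (hx, hy + 1) ∈ my_body_ ∧ "up" ∈ possible_moves_ then
    (PySem.List.remove? pm3 "up").getD pm3 else pm3

-- ===== PORT B =====
-- dirmap.get((dx, dy))
def pvDirOf (dx dy : Int) : Option String :=
  if dx = -1 ∧ dy = 0 then some "left"
  else if dx = 1 ∧ dy = 0 then some "right"
  else if dx = 0 ∧ dy = -1 then some "down"
  else if dx = 0 ∧ dy = 1 then some "up"
  else none

def avoid_hitting_myself_py_alt (my_body : List (List (String × Int))) (possible_moves : List String) : List String :=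
  let head := my_body.headD []
  let hx := pvGetK head "x"
  let hy := pvGetK head "y"
  let blocked : PySem.Set String := my_body.foldl (fun s seg =>
      match pvDirOf (pvGetK seg "x" - hx) (pvGetK seg "y" - hy) with
      | some d => PySem.Set.add s d
      | none => s) PySem.Set.empty
  ["left", "right", "down", "up"].foldl (fun pm d =>
      if d ∈ blocked ∧ d ∈ pm then (PySem.List.remove? pm d).getD pm else pm) possible_moves

-- ===== PRECONDITION & SPEC =====
-- Pre_ excludes exactly the inputs where the Python A raises: my_body == [] (IndexError
-- on my_body[0]) and segments missing an "x" or "y" key (KeyError on body["x"]/body["y"]).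
def Pre_avoid_hitting_myself_py (my_body : List (List (String × Int))) (possible_moves : List String) : Prop :=
  my_body ≠ [] ∧ ∀ b ∈ my_body,
    (b.find? (fun p => p.1 == "x")).isSome = true ∧ (b.find? (fun p => p.1 == "y")).isSome = true
instance (my_body : List (List (String × Int))) (possible_moves : List String) : Decidable (Pre_avoid_hitting_myself_py my_body possible_moves) := by unfold Pre_avoid_hitting_myself_py; infer_instance

def pvWitness_avoid_hitting_myself_py : (List (List (String × Int))) × List String :=
  ([[("x", 0), ("y", 0)], [("x", 1), ("y", 0)]], ["up", "down", "left", "right"])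

def Spec_avoid_hitting_myself_py (my_body : List (List (String × Int))) (possible_moves : List String) (out : List String) : Prop := out = avoid_hitting_myself_py_alt my_body possible_moves
instance (my_body : List (List (String × Int))) (possible_moves : List String) (out : List String) : Decidable (Spec_avoid_hitting_myself_py my_body possible_moves out) := by unfold Spec_avoid_hitting_myself_py; infer_instance

-- ===== CLAIM (what is proved, stated in full; the proofs are below) =====
def Claim_equal_avoid_hitting_myself_py : Prop := ∀ (my_body : List (List (String × Int))) (possible_moves : List String), Dom_avoid_hitting_myself_py my_body possible_moves → Pre_avoid_hitting_myself_py my_body possible_moves → Spec_avoid_hitting_myself_py my_body possible_moves (avoid_hitting_myself_py my_body possible_moves)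

-- ===== LEMMAS AND PROOFS =====

-- membership of d in B's blocked set at the end of the fold
theorem pv_mem_blocked (L : List (List (String × Int))) (hx hy : Int)
    (s : PySem.Set String) (d : String) :
    d ∈ L.foldl (fun s seg =>
        match pvDirOf (pvGetK seg "x" - hx) (pvGetK seg "y" - hy) with
        | some e => PySem.Set.add s e
        | none => s) s ↔
      d ∈ s ∨ ∃ b ∈ L, pvDirOf (pvGetK b "x" - hx) (pvGetK b "y" - hy) = some d := by
  induction L generalizing s with
  | nil => simp
  | cons b L ih =>
    simp only [List.foldl_cons, List.mem_cons, ih]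
    cases h : pvDirOf (pvGetK b "x" - hx) (pvGetK b "y" - hy) with
    | none => simp only; aesop
    | some e => simp only [PySem.Set.mem_add]; aesop

theorem pv_dirOf_left (dx dy : Int) : pvDirOf dx dy = some "left" ↔ dx = -1 ∧ dy = 0 := by
  unfold pvDirOf; split_ifs <;> simp_all

theorem pv_dirOf_right (dx dy : Int) : pvDirOf dx dy = some "right" ↔ dx = 1 ∧ dy = 0 := by
  unfold pvDirOf; split_ifs <;> simp_all

theorem pv_dirOf_down (dx dy : Int) : pvDirOf dx dy = some "down" ↔ dx = 0 ∧ dy = -1 := by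
  unfold pvDirOf; split_ifs <;> simp_all

theorem pv_dirOf_up (dx dy : Int) : pvDirOf dx dy = some "up" ↔ dx = 0 ∧ dy = 1 := by
  unfold pvDirOf; split_ifs <;> simp_all

-- A's neighbour-coordinate membership equals B's blocked-direction membership
theorem pv_cond (mb : List (List (String × Int))) (hx hy cx cy : Int) (d : String)
    (hdir : ∀ dx dy, pvDirOf dx dy = some d ↔ dx = cx - hx ∧ dy = cy - hy) :
    ((cx, cy) ∈ PySem.Set.ofList (mb.map (fun b => (pvGetK b "x", pvGetK b "y")))) ↔
      d ∈ mb.foldl (fun s seg =>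
        match pvDirOf (pvGetK seg "x" - hx) (pvGetK seg "y" - hy) with
        | some e => PySem.Set.add s e
        | none => s) PySem.Set.empty := by
  rw [PySem.Set.mem_ofList, pv_mem_blocked]
  simp only [List.mem_map]
  constructor
  · rintro ⟨b, hb, hbe⟩
    refine Or.inr ⟨b, hb, (hdir _ _).mpr ?_⟩
    have h1 := congrArg Prod.fst hbe
    have h2 := congrArg Prod.snd hbe
    simp at h1 h2
    omega
  · rintro (hemp | ⟨b, hb, hbe⟩)
    · simp [PySem.Set.empty] at hemp
    · refine ⟨b, hb, ?_⟩
      have := (hdir _ _).mp hbe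
      simp only [Prod.mk.injEq]
      omega

-- a conditional removal of e never changes membership of d ≠ e
theorem pv_mem_step {d e : String} (h : d ≠ e) (c : Prop) [Decidable c] (pm : List String) :
    (d ∈ (if c then (PySem.List.remove? pm e).getD pm else pm)) ↔ d ∈ pm := by
  split_ifs with hc
  · by_cases he : e ∈ pm
    · rw [PySem.List.remove?_eq_some_erase pm e he]
      simp [List.mem_erase_of_ne h]
    · rw [(PySem.List.remove?_eq_none_iff pm e).mpr he]
      simp
  · exact Iff.rfl

theorem pv_main (mb : List (List (String × Int))) (pm : List String) :
    avoid_hitting_myself_py mb pm = avoid_hitting_myself_py_alt mb pm := by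
  unfold avoid_hitting_myself_py avoid_hitting_myself_py_alt
  dsimp only
  generalize pvGetK (mb.headD []) "x" = hx
  generalize pvGetK (mb.headD []) "y" = hy
  have cL := pv_cond mb hx hy (hx - 1) hy "left"
    (fun dx dy => by rw [pv_dirOf_left]; omega)
  have cR := pv_cond mb hx hy (hx + 1) hy "right"
    (fun dx dy => by rw [pv_dirOf_right]; omega)
  have cD := pv_cond mb hx hy hx (hy - 1) "down"
    (fun dx dy => by rw [pv_dirOf_down]; omega)
  have cU := pv_cond mb hx hy hx (hy + 1) "up"
    (fun dx dy => by rw [pv_dirOf_up]; omega)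
  simp only [List.foldl_cons, List.foldl_nil, PySem.Set.mem_ofList, cL, cR, cD, cU,
    pv_mem_step (show ("right" : String) ≠ "left" by decide),
    pv_mem_step (show ("down" : String) ≠ "left" by decide),
    pv_mem_step (show ("down" : String) ≠ "right" by decide),
    pv_mem_step (show ("up" : String) ≠ "left" by decide),
    pv_mem_step (show ("up" : String) ≠ "right" by decide),
    pv_mem_step (show ("up" : String) ≠ "down" by decide)]

-- ===== VERDICT (by name: the statement is the Claim_ definition above) =====
theorem avoid_hitting_myself_py_spec : Claim_equal_avoid_hitting_myself_py := by
  intro mb pm _ _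
  unfold Spec_avoid_hitting_myself_py
  exact pv_main mb pm
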